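-- pv_equiv track=rewrite | github.com/DOKOS-TAYOS/Tensor-Network-Visualization | examples/tensorkrowch_demo.py | _pairwise_specs
-- ===== SOURCE A (Python) =====
-- from typing import Any, TypeAlias
--
-- NodeSpec: TypeAlias = tuple[str, tuple[str, ...]]
--
-- BondSpec: TypeAlias = tuple[tuple[str, str], ...]
--
-- def _pairwise_specs(
--     node_names: tuple[str, ...],
--     edges: tuple[tuple[str, str], ...],
-- ) -> tuple[tuple[NodeSpec, ...], tuple[BondSpec, ...]]:
--     axes_by_node: dict[str, list[str]] = {name: ["phys"] for name in node_names}
--     for edge_index, (left, right) in enumerate(edges):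
--         axis_name = f"b{edge_index}"
--         axes_by_node[left].append(axis_name)
--         axes_by_node[right].append(axis_name)
--
--     node_specs = tuple((name, tuple(axes_by_node[name])) for name in node_names)
--     bond_specs = tuple(
--         ((left, f"b{edge_index}"), (right, f"b{edge_index}"))
--         for edge_index, (left, right) in enumerate(edges)
--     )
--     return node_specs, bond_specs
-- ===== SOURCE B (Python) =====
-- def _axes(name, edges):
--     axes = ["phys"]
--     for i, (left, right) in enumerate(edges):
--         if left == name:
--             axes.append(f"b{i}")
--         if right == name:
--             axes.append(f"b{i}")
--     return tuple(axes)
--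
--
-- def _pairwise_specs(node_names, edges):
--     # endpoint validation up front (the dict that used to enforce this is gone)
--     known = set(node_names)
--     for left, right in edges:
--         if left not in known:
--             raise KeyError(left)
--         if right not in known:
--             raise KeyError(right)
--     node_specs = tuple((name, _axes(name, edges)) for name in node_names)
--     bond_specs = tuple(
--         ((left, f"b{edge_index}"), (right, f"b{edge_index}"))
--         for edge_index, (left, right) in enumerate(edges)
--     )
--     return node_specs, bond_specs
-- ===== Notes on version B (the rewrite author's own statement) =====
-- stated objective: alternative
-- what changed: node_specs no longer built via a mutable name-indexed dict of axis lists; after an up-front endpoint validation (same KeyError contract as A), each node's axes are computed by an independent scan of the edges with two equality checks per edge (bond_specs unchanged).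
import Mathlib
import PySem

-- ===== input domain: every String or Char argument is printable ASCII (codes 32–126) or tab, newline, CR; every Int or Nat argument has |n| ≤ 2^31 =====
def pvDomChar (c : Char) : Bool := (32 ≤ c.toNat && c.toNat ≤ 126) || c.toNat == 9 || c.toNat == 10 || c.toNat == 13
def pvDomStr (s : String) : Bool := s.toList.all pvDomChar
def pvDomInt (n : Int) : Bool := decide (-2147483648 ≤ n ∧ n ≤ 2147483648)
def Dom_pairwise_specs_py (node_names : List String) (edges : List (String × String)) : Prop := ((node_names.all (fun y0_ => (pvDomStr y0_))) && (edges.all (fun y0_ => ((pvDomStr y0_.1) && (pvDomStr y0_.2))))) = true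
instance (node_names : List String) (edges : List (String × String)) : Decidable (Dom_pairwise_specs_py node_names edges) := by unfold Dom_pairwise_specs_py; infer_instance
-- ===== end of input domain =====

-- B replaces A's mutable name-indexed dict of axis lists by an independent per-node scan of
-- the edges (two equality checks per edge); bond_specs is the same comprehension in both.

-- ===== PORT A =====
-- f"b{edge_index}"
def pvAxisName (i : Int) : String := "b" ++ PySem.Int.toStr i

-- {name: ["phys"] for name in node_names}
def pvInitDict (node_names : List String) : PySem.Dict String (List String) :=
  node_names.foldl (fun d n => d.insert n ["phys"]) PySem.Dict.empty

-- loop body: axes_by_node[left].append(axis_name); axes_by_node[right].append(axis_name)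
-- (Dict.modify with default []: exact where the key is present; Python raises KeyError on a
-- missing key, which Pre_ excludes)
def pvStepA (d : PySem.Dict String (List String)) (p : Int × (String × String)) :
    PySem.Dict String (List String) :=
  let axis := pvAxisName p.1
  (d.modify p.2.1 [] (fun xs => xs ++ [axis])).modify p.2.2 [] (fun xs => xs ++ [axis])

def pairwise_specs_py (node_names : List String) (edges : List (String × String)) :
    (List (String × List String)) × (List (List (String × String))) :=
  let axes_by_node := (PySem.List.enumerate edges 0).foldl pvStepA (pvInitDict node_names)
  let node_specs := node_names.map (fun name => (name, axes_by_node.getD name []))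
  let bond_specs := (PySem.List.enumerate edges 0).map
    (fun p => [(p.2.1, pvAxisName p.1), (p.2.2, pvAxisName p.1)])
  (node_specs, bond_specs)

-- ===== PORT B =====
-- loop body of _axes: two independent equality checks per edge
def pvStepB (name : String) (axes : List String) (p : Int × (String × String)) : List String :=
  let axes := if p.2.1 == name then axes ++ [pvAxisName p.1] else axes
  if p.2.2 == name then axes ++ [pvAxisName p.1] else axes

-- _axes(name, edges)
def pvAxesOf (name : String) (edges : List (String × String)) : List String :=
  (PySem.List.enumerate edges 0).foldl (pvStepB name) ["phys"]

-- B's up-front validation loop only raises KeyError (exactly outside Pre_) and computes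
-- nothing, so it contributes no code to the port; Pre_ excludes those inputs.
def pairwise_specs_py_alt (node_names : List String) (edges : List (String × String)) :
    (List (String × List String)) × (List (List (String × String))) :=
  let node_specs := node_names.map (fun name => (name, pvAxesOf name edges))
  let bond_specs := (PySem.List.enumerate edges 0).map
    (fun p => [(p.2.1, pvAxisName p.1), (p.2.2, pvAxisName p.1)])
  (node_specs, bond_specs)

-- ===== PRECONDITION & SPEC =====
-- Pre_: every edge endpoint occurs in node_names; otherwise A (and B) raise KeyError.
def Pre_pairwise_specs_py (node_names : List String) (edges : List (String × String)) : Prop :=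
  ∀ p ∈ edges, p.1 ∈ node_names ∧ p.2 ∈ node_names
instance (node_names : List String) (edges : List (String × String)) :
    Decidable (Pre_pairwise_specs_py node_names edges) := by
  unfold Pre_pairwise_specs_py; infer_instance

def pvWitness_pairwise_specs_py : List String × (List (String × String)) :=
  (["x", "y"], [("x", "y"), ("y", "y")])

def Spec_pairwise_specs_py (node_names : List String) (edges : List (String × String))
    (out : (List (String × List String)) × (List (List (String × String)))) : Prop :=
  out = pairwise_specs_py_alt node_names edges
instance (node_names : List String) (edges : List (String × String))
    (out : (List (String × List String)) × (List (List (String × String)))) :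
    Decidable (Spec_pairwise_specs_py node_names edges out) := by
  unfold Spec_pairwise_specs_py; infer_instance

-- ===== CLAIM (what is proved, stated in full; the proofs are below) =====
def Claim_equal_pairwise_specs_py : Prop := ∀ (node_names : List String) (edges : List (String × String)), Dom_pairwise_specs_py node_names edges → Pre_pairwise_specs_py node_names edges → Spec_pairwise_specs_py node_names edges (pairwise_specs_py node_names edges)


-- ===== LEMMAS AND PROOFS =====

-- A's edge loop, read back through getD, is exactly B's per-name scan continued from the
-- current value of the name's entry.
theorem foldA_getD (es : List (Int × (String × String))) (name : String) :
    ∀ d : PySem.Dict String (List String),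
      (es.foldl pvStepA d).getD name [] = es.foldl (pvStepB name) (d.getD name []) := by
  induction es with
  | nil => intro d; rfl
  | cons p es ih =>
    intro d
    simp only [List.foldl_cons, ih]
    congr 1
    simp only [pvStepA, pvStepB]
    by_cases h2 : p.2.2 = name
    · subst h2
      rw [PySem.Dict.getD_modify_self]
      by_cases h1 : p.2.1 = p.2.2
      · rw [h1, PySem.Dict.getD_modify_self]; simp
      · rw [PySem.Dict.getD_modify_of_ne _ _ _ (Ne.symm h1)]
        simp [beq_iff_eq, h1]
    · rw [PySem.Dict.getD_modify_of_ne _ _ _ (Ne.symm h2)]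
      by_cases h1 : p.2.1 = name
      · subst h1
        rw [PySem.Dict.getD_modify_self]
        simp [beq_iff_eq, h2]
      · rw [PySem.Dict.getD_modify_of_ne _ _ _ (Ne.symm h1)]
        simp [beq_iff_eq, h1, h2]

theorem initDict_getD_of_not_mem (name : String) :
    ∀ (ns : List String) (d : PySem.Dict String (List String)), name ∉ ns →
      ((ns.foldl (fun d n => d.insert n ["phys"]) d).getD name []) = d.getD name [] := by
  intro ns
  induction ns with
  | nil => intro d _; rfl
  | cons n ns ih =>
    intro d h
    simp only [List.mem_cons, not_or] at h
    simp only [List.foldl_cons, ih _ h.2,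
      PySem.Dict.getD_insert_of_ne _ _ _ h.1]

theorem initDict_getD_of_mem (name : String) :
    ∀ (ns : List String) (d : PySem.Dict String (List String)), name ∈ ns →
      ((ns.foldl (fun d n => d.insert n ["phys"]) d).getD name []) = ["phys"] := by
  intro ns
  induction ns with
  | nil => intro d h; cases h
  | cons n ns ih =>
    intro d h
    by_cases hm : name ∈ ns
    · simp only [List.foldl_cons, ih _ hm]
    · have hn : name = n := by
        rcases List.mem_cons.mp h with h' | h'
        · exact h'
        · exact absurd h' hm
      subst hn
      simp only [List.foldl_cons,
        initDict_getD_of_not_mem name ns _ hm, PySem.Dict.getD_insert_self]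

-- ===== VERDICT (by name: the statement is the Claim_ definition above) =====
theorem pairwise_specs_py_spec : Claim_equal_pairwise_specs_py := by
  intro node_names edges _hdom _hpre
  unfold Spec_pairwise_specs_py pairwise_specs_py pairwise_specs_py_alt
  refine Prod.ext ?_ rfl
  simp only
  apply List.map_congr_left
  intro name hmem
  have h := foldA_getD (PySem.List.enumerate edges 0) name (pvInitDict node_names)
  rw [h, pvInitDict, initDict_getD_of_mem name node_names _ hmem]
  rfl
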